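-- pv_equiv track=rewrite | github.com/smailmehrez/Traitement-d-image- | main.py | diviser_vecteur
-- ===== SOURCE A (Python) =====
-- def diviser_vecteur(vecteur, k):
--     if k == 0:
--         return [vecteur]
--
--     n = len(vecteur)
--     vecteur1 = vecteur[:n // 2]
--     vecteur2 = vecteur[n // 2:]
--
--     sous_vecteurs1 = diviser_vecteur(vecteur1, k - 1)
--     sous_vecteurs2 = diviser_vecteur(vecteur2, k - 1)
--
--     # Concaténer les sous-vecteurs
--     return sous_vecteurs1 + sous_vecteurs2
-- ===== SOURCE B (Python) =====
-- def diviser_vecteur(vecteur, k):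
--     # Iterative: refine a list of (lo, hi) index bounds k times, then slice
--     # each segment out of the original vector exactly once (A re-copies the
--     # data at every recursion level).
--     bounds = [(0, len(vecteur))]
--     for _ in range(k):
--         new_bounds = []
--         for lo, hi in bounds:
--             mid = lo + (hi - lo) // 2
--             new_bounds.append((lo, mid))
--             new_bounds.append((mid, hi))
--         bounds = new_bounds
--     return [vecteur[lo:hi] for lo, hi in bounds]
-- ===== Notes on version B (the rewrite author's own statement) =====
-- stated objective: alternative
-- what changed: B replaces A's recursive halving, which copies both halves of the data at every one of the k levels, by an iterative refinement of (lo, hi) index bounds followed by a single slice per final segment.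
-- outside the precondition, e.g. on diviser_vecteur([1, 2, 3], -1): A raises RecursionError, B returns [[1, 2, 3]]
import Mathlib
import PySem

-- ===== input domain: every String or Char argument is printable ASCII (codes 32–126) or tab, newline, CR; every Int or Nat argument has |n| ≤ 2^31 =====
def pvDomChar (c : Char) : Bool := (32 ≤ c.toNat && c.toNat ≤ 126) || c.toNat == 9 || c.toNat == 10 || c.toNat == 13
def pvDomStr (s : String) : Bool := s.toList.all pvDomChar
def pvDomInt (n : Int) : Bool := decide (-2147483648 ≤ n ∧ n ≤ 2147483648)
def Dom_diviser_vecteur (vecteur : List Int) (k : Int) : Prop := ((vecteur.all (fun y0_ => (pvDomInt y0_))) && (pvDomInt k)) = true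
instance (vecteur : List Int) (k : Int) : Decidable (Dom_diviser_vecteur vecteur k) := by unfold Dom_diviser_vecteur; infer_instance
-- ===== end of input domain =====

-- B replaces A's recursive halving (which copies both halves of the data at every
-- one of the k levels) by an iterative refinement of (lo, hi) index bounds followed
-- by one slice per final segment.

-- ===== PORT A =====
-- A recurses on k; for k ≥ 0 (all of Pre_) the recursion depth is exactly k, so the
-- port runs on the fuel k.toNat.  vecteur[:n//2] / vecteur[n//2:] with n = len(vecteur) ≥ 0
-- are exactly List.take (n / 2) / List.drop (n / 2) (Nat division = Python's // on non-negatives).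
def dvAgo : List Int → Nat → List (List Int)
  | v, 0 => [v]
  | v, m + 1 => dvAgo (v.take (v.length / 2)) m ++ dvAgo (v.drop (v.length / 2)) m

def diviser_vecteur (vecteur : List Int) (k : Int) : List (List Int) :=
  dvAgo vecteur k.toNat

-- ===== PORT B =====
-- one iteration of Source B's inner loop body for a single (lo, hi) pair
def altSplit (p : Int × Int) : List (Int × Int) :=
  [(p.1, p.1 + PySem.Int.floordiv (p.2 - p.1) 2), (p.1 + PySem.Int.floordiv (p.2 - p.1) 2, p.2)]

-- 'for _ in range(k)' runs max k 0 = k.toNat times; the final comprehension slices v[lo:hi].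
def diviser_vecteur_alt (vecteur : List Int) (k : Int) : List (List Int) :=
  ((List.range k.toNat).foldl (fun bs _ => bs.flatMap altSplit) [((0 : Int), (vecteur.length : Int))]).map
    (fun p => PySem.List.slice vecteur (some p.1) (some p.2))

-- ===== PRECONDITION & SPEC =====
-- Pre_ excludes exactly k < 0, on which A's recursion never reaches its base case
-- and raises RecursionError.
def Pre_diviser_vecteur (vecteur : List Int) (k : Int) : Prop := 0 ≤ k
instance (vecteur : List Int) (k : Int) : Decidable (Pre_diviser_vecteur vecteur k) := by unfold Pre_diviser_vecteur; infer_instance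

def pvWitness_diviser_vecteur : List Int × Int := ([1, 2, 3, 4, 5], 2)

def Spec_diviser_vecteur (vecteur : List Int) (k : Int) (out : List (List Int)) : Prop := out = diviser_vecteur_alt vecteur k
instance (vecteur : List Int) (k : Int) (out : List (List Int)) : Decidable (Spec_diviser_vecteur vecteur k out) := by unfold Spec_diviser_vecteur; infer_instance

-- ===== CLAIM (what is proved, stated in full; the proofs are below) =====
def Claim_equal_diviser_vecteur : Prop := ∀ (vecteur : List Int) (k : Int), Dom_diviser_vecteur vecteur k → Pre_diviser_vecteur vecteur k → Spec_diviser_vecteur vecteur k (diviser_vecteur vecteur k)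

-- ===== LEMMAS AND PROOFS =====

-- the bound-refinement loop, indexed by the number of remaining iterations
def iterSplit : Nat → List (Int × Int) → List (Int × Int)
  | 0, bs => bs
  | m + 1, bs => iterSplit m (bs.flatMap altSplit)

-- the depth-first bound tree over Int indices (what the loop computes, proved below)
def boundsI : Int → Int → Nat → List (Int × Int)
  | lo, hi, 0 => [(lo, hi)]
  | lo, hi, m + 1 =>
    boundsI lo (lo + PySem.Int.floordiv (hi - lo) 2) m ++
    boundsI (lo + PySem.Int.floordiv (hi - lo) 2) hi m

-- the same tree over Nat indices (what A's recursion follows, proved below)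
def boundsN : Nat → Nat → Nat → List (Nat × Nat)
  | lo, hi, 0 => [(lo, hi)]
  | lo, hi, m + 1 => boundsN lo (lo + (hi - lo) / 2) m ++ boundsN (lo + (hi - lo) / 2) hi m

lemma foldl_flatMap_eq_iterSplit (l : List Nat) (bs : List (Int × Int)) :
    l.foldl (fun bs _ => bs.flatMap altSplit) bs = iterSplit l.length bs := by
  induction l generalizing bs with
  | nil => rfl
  | cons x xs ih => simpa [iterSplit] using ih (bs.flatMap altSplit)

lemma iterSplit_eq_flatMap_boundsI (m : Nat) (bs : List (Int × Int)) :
    iterSplit m bs = bs.flatMap (fun p => boundsI p.1 p.2 m) := by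
  induction m generalizing bs with
  | zero => simp [iterSplit, boundsI]
  | succ m ih =>
    rw [iterSplit, ih, List.flatMap_assoc]
    refine List.flatMap_congr (fun p _ => ?_)
    simp [altSplit, boundsI]

lemma boundsI_natCast (m : Nat) : ∀ (lo hi : Nat), lo ≤ hi →
    boundsI (lo : Int) (hi : Int) m = (boundsN lo hi m).map (fun p => ((p.1 : Int), (p.2 : Int))) := by
  induction m with
  | zero => intro lo hi _; simp [boundsI, boundsN]
  | succ m ih =>
    intro lo hi hle
    have hcast : ((hi : Int) - (lo : Int)) = ((hi - lo : Nat) : Int) := by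
      omega
    have hmid : (lo : Int) + PySem.Int.floordiv ((hi : Int) - (lo : Int)) 2
        = (((lo + (hi - lo) / 2 : Nat)) : Int) := by
      rw [hcast, show (2:Int) = ((2:Nat):Int) from rfl, PySem.Int.floordiv_natCast]
      push_cast
      ring
    have h1 : lo ≤ lo + (hi - lo) / 2 := Nat.le_add_right _ _
    have h2 : lo + (hi - lo) / 2 ≤ hi := by omega
    rw [boundsI, boundsN, hmid, ih lo _ h1, ih _ hi h2, List.map_append]

lemma dvAgo_eq_map_boundsN (v : List Int) (m : Nat) : ∀ (lo hi : Nat), lo ≤ hi → hi ≤ v.length →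
    dvAgo ((v.drop lo).take (hi - lo)) m
      = (boundsN lo hi m).map (fun p => (v.drop p.1).take (p.2 - p.1)) := by
  induction m with
  | zero => intro lo hi _ _; simp [dvAgo, boundsN]
  | succ m ih =>
    intro lo hi hle hlen
    have hwlen : ((v.drop lo).take (hi - lo)).length = hi - lo := by
      simp [List.length_take, List.length_drop]
      omega
    have htake : ((v.drop lo).take (hi - lo)).take ((hi - lo) / 2)
        = (v.drop lo).take ((lo + (hi - lo) / 2) - lo) := by
      rw [List.take_take]
      congr 1
      omega
    have hdrop : ((v.drop lo).take (hi - lo)).drop ((hi - lo) / 2)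
        = (v.drop (lo + (hi - lo) / 2)).take (hi - (lo + (hi - lo) / 2)) := by
      rw [List.drop_take, List.drop_drop]
      congr 1
      omega
    have h1 : lo ≤ lo + (hi - lo) / 2 := Nat.le_add_right _ _
    have h2 : lo + (hi - lo) / 2 ≤ hi := by omega
    rw [dvAgo, hwlen, htake, hdrop, boundsN, List.map_append,
      ih lo (lo + (hi - lo) / 2) h1 (le_trans h2 hlen),
      ih (lo + (hi - lo) / 2) hi h2 hlen]

lemma diviser_vecteur_eq_alt (v : List Int) (k : Int) :
    diviser_vecteur v k = diviser_vecteur_alt v k := by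
  unfold diviser_vecteur diviser_vecteur_alt
  rw [foldl_flatMap_eq_iterSplit, List.length_range, iterSplit_eq_flatMap_boundsI]
  have hb : ([((0 : Int), (v.length : Int))].flatMap (fun p => boundsI p.1 p.2 k.toNat))
      = boundsI 0 (v.length : Int) k.toNat := by simp
  rw [hb]
  have h0 : ((0 : Nat) : Int) = (0 : Int) := rfl
  rw [← h0, boundsI_natCast k.toNat 0 v.length (Nat.zero_le _), List.map_map]
  have hslice : ∀ p : Nat × Nat,
      PySem.List.slice v (some (p.1 : Int)) (some (p.2 : Int)) = (v.drop p.1).take (p.2 - p.1) :=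
    fun p => PySem.List.slice_natCast v p.1 p.2
  have : dvAgo ((v.drop 0).take (v.length - 0)) k.toNat
      = (boundsN 0 v.length k.toNat).map (fun p => (v.drop p.1).take (p.2 - p.1)) :=
    dvAgo_eq_map_boundsN v k.toNat 0 v.length (Nat.zero_le _) (le_refl _)
  simp only [List.drop_zero, Nat.sub_zero, List.take_length] at this
  rw [this]
  exact List.map_congr_left (fun p _ => (hslice p).symm)

-- ===== VERDICT (by name: the statement is the Claim_ definition above) =====
theorem diviser_vecteur_spec : Claim_equal_diviser_vecteur := by
  intro v k _ _
  exact diviser_vecteur_eq_alt v k
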